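-- pv_equiv track=rewrite | github.com/chenhaitao405/Weld | convert/yolo2coco.py | _names_from_label_id_map
-- ===== SOURCE A (Python) =====
-- from typing import List, Dict, Tuple, Set, Optional
--
-- def _names_from_label_id_map(label_id_map: Dict) -> List[str]:
--     if not isinstance(label_id_map, dict):
--         return []
--
--     filtered = [
--         (int(idx), str(name))
--         for name, idx in label_id_map.items()
--         if isinstance(idx, int) and idx >= 0
--     ]
--     if not filtered:
--         return []
--
--     max_idx = max(idx for idx, _ in filtered)
--     names = [f"class_{i}" for i in range(max_idx + 1)]
--     for idx, name in filtered:
--         if 0 <= idx < len(names):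
--             names[idx] = name
--     return names
-- ===== SOURCE B (Python) =====
-- def _names_from_label_id_map(label_id_map):
--     if not isinstance(label_id_map, dict):
--         return []
--     pairs = sorted(
--         ((int(idx), str(name))
--          for name, idx in label_id_map.items()
--          if isinstance(idx, int) and idx >= 0),
--         key=lambda p: p[0],
--     )
--     if not pairs:
--         return []
--     out = []
--     j = 0
--     for i in range(pairs[-1][0] + 1):
--         name = f"class_{i}"
--         while j < len(pairs) and pairs[j][0] == i:
--             name = pairs[j][1]
--             j += 1
--         out.append(name)
--     return out
-- ===== Notes on version B (the rewrite author's own statement) =====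
-- stated objective: alternative
-- what changed: Replaces A's pre-filled default-name list plus guarded overwrite loop by a stable sort of the (id,name) pairs followed by a single linear merge that consumes each run of equal ids while emitting the output slots in order.
import Mathlib
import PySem

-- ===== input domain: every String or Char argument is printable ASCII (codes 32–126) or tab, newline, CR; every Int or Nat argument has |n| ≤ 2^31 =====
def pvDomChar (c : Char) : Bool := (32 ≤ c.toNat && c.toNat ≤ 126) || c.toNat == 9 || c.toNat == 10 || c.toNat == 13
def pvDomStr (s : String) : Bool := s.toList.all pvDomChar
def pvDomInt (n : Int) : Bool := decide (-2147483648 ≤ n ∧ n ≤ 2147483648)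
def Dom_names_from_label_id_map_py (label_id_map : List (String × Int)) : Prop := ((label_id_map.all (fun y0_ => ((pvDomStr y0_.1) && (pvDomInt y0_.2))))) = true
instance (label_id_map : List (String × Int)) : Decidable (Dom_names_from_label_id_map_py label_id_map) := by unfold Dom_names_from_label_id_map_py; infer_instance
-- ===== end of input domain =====

-- B replaces A's pre-filled default-name list plus guarded overwrite loop by a stable sort of the
-- (id, name) pairs followed by one linear merge that consumes each run of equal ids (objective:
-- alternative algorithm). Same return value on every input.

-- ===== PORT A =====
def names_from_label_id_map_py (label_id_map : List (String × Int)) : List String :=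
  let filtered : List (Int × String) :=
    label_id_map.filterMap (fun p => if 0 ≤ p.2 then some (p.2, p.1) else none)
  if filtered = [] then []
  else
    match PySem.List.max? (filtered.map Prod.fst) (fun x => x) with
    | none => []   -- unreachable: filtered ≠ []
    | some maxIdx =>
      let names := (PySem.List.pyRange 0 (maxIdx + 1) 1).map
        (fun i => "class_" ++ PySem.Int.toStr i)
      filtered.foldl (fun ns p =>
        if 0 ≤ p.1 ∧ p.1 < (ns.length : Int) then ns.set p.1.toNat p.2 else ns) names

-- ===== PORT B =====
-- the inner `while j < len(pairs) and pairs[j][0] == i` loop of Source B: consume the run of pairs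
-- whose id equals i, remembering the last name seen (exact, step for step)
def pvConsume (i : Int) : List (Int × String) → String → String × List (Int × String)
  | [], name => (name, [])
  | p :: rest, name => if p.1 = i then pvConsume i rest p.2 else (name, p :: rest)

def names_from_label_id_map_py_alt (label_id_map : List (String × Int)) : List String :=
  let pairs := PySem.List.sorted
    (label_id_map.filterMap (fun p => if 0 ≤ p.2 then some (p.2, p.1) else none))
    (fun q => q.1) false
  match pairs.getLast? with
  | none => []          -- `if not pairs: return []`
  | some last =>        -- pairs[-1]
    ((PySem.List.pyRange 0 (last.1 + 1) 1).foldl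
      (fun (st : List (Int × String) × List String) i =>
        let r := pvConsume i st.1 ("class_" ++ PySem.Int.toStr i)
        (r.2, st.2 ++ [r.1]))
      (pairs, [])).2

-- ===== PRECONDITION & SPEC =====
def Spec_names_from_label_id_map_py (label_id_map : List (String × Int)) (out : List String) : Prop := out = names_from_label_id_map_py_alt label_id_map
instance (label_id_map : List (String × Int)) (out : List String) : Decidable (Spec_names_from_label_id_map_py label_id_map out) := by unfold Spec_names_from_label_id_map_py; infer_instance

-- ===== CLAIM (what is proved, stated in full; the proofs are below) =====
def Claim_equal_names_from_label_id_map_py : Prop := ∀ (label_id_map : List (String × Int)), Dom_names_from_label_id_map_py label_id_map → Spec_names_from_label_id_map_py label_id_map (names_from_label_id_map_py label_id_map)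

-- ===== LEMMAS AND PROOFS =====

-- last value written for key k while traversing F in order (none if k never occurs)
def pvLast (F : List (Int × String)) (k : Int) : Option String :=
  match F with
  | [] => none
  | p :: F' =>
    match pvLast F' k with
    | some v => some v
    | none => if p.1 = k then some p.2 else none

theorem pvLast_eq_filter (l : List (Int × String)) (k : Int) :
    pvLast l k = (l.filter (fun p => decide (p.1 = k))).getLast?.map Prod.snd := by
  induction l with
  | nil => rfl
  | cons p l' ih =>
    simp only [pvLast, ih, List.filter_cons]
    cases hfl : l'.filter (fun p => decide (p.1 = k)) with
    | nil =>
      by_cases hp : p.1 = k <;> simp [hp]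
    | cons a t =>
      cases hv : (a :: t).getLast? with
      | none => exact absurd (List.getLast?_eq_none_iff.mp hv) (by simp)
      | some v =>
        by_cases hp : p.1 = k <;> simp [hp, List.getLast?_cons_cons, hv]

theorem pvLast_eq_none_of (l : List (Int × String)) (k : Int)
    (h : ∀ q ∈ l, q.1 ≠ k) : pvLast l k = none := by
  induction l with
  | nil => rfl
  | cons p l' ih =>
    simp only [pvLast, ih (fun q hq => h q (List.mem_cons_of_mem _ hq))]
    simp [h p (List.mem_cons_self)]

-- stability of PySem's insertion sort: inserting an element does not disturb the relative
-- order of the elements with any fixed key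
theorem insertBy_filter_of_sorted (x : Int × String) (acc : List (Int × String)) (k : Int)
    (hs : acc.Pairwise (fun a b => a.1 ≤ b.1)) :
    (PySem.List.insertBy (fun a b => decide (a.1 < b.1)) x acc).filter
        (fun p => decide (p.1 = k))
      = acc.filter (fun p => decide (p.1 = k)) ++ (if x.1 = k then [x] else []) := by
  induction acc with
  | nil =>
    by_cases hx : x.1 = k <;> simp [PySem.List.insertBy, hx]
  | cons y ys ih =>
    rw [List.pairwise_cons] at hs
    simp only [PySem.List.insertBy]
    by_cases hlt : x.1 < y.1
    · rw [if_pos (by simpa using hlt)]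
      by_cases hx : x.1 = k
      · have hnil : (y :: ys).filter (fun p => decide (p.1 = k)) = [] := by
          rw [List.filter_eq_nil_iff]
          intro q hq
          rcases List.mem_cons.mp hq with h | h
          · subst h; simp; omega
          · have := hs.1 q h; simp; omega
        simp [hx, hnil]
      · simp [List.filter_cons, hx]
    · rw [if_neg (by simpa using hlt)]
      rw [List.filter_cons, List.filter_cons, ih hs.2]
      by_cases hy : y.1 = k <;> simp [hy]

theorem insertBy_pairwise (x : Int × String) (acc : List (Int × String))
    (hs : acc.Pairwise (fun a b => a.1 ≤ b.1)) :
    (PySem.List.insertBy (fun a b => decide (a.1 < b.1)) x acc).Pairwise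
      (fun a b => a.1 ≤ b.1) := by
  induction acc with
  | nil => simp [PySem.List.insertBy]
  | cons y ys ih =>
    rw [List.pairwise_cons] at hs
    simp only [PySem.List.insertBy]
    by_cases hlt : x.1 < y.1
    · rw [if_pos (by simpa using hlt)]
      rw [List.pairwise_cons]
      refine ⟨?_, List.pairwise_cons.mpr hs⟩
      intro z hz
      rcases List.mem_cons.mp hz with h | h
      · subst h; omega
      · have := hs.1 z h; omega
    · rw [if_neg (by simpa using hlt)]
      rw [List.pairwise_cons]
      refine ⟨?_, ih hs.2⟩
      intro z hz
      rcases (PySem.List.mem_insertBy _ _ _ _).mp hz with h | h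
      · subst h; omega
      · exact hs.1 z h

theorem foldl_insertBy_filter (F acc : List (Int × String)) (k : Int)
    (hs : acc.Pairwise (fun a b => a.1 ≤ b.1)) :
    (F.foldl (fun acc x => PySem.List.insertBy (fun a b => decide (a.1 < b.1)) x acc) acc).filter
        (fun p => decide (p.1 = k))
      = acc.filter (fun p => decide (p.1 = k)) ++ F.filter (fun p => decide (p.1 = k)) := by
  induction F generalizing acc with
  | nil => simp
  | cons x F' ih =>
    rw [List.foldl_cons, ih _ (insertBy_pairwise x acc hs),
      insertBy_filter_of_sorted x acc k hs, List.filter_cons, List.append_assoc]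
    by_cases hx : x.1 = k <;> simp [hx]

-- stability corollary: sorting by id does not change the subsequence of pairs with id k
theorem sorted_filter_key (F : List (Int × String)) (k : Int) :
    (PySem.List.sorted F (fun q => q.1) false).filter (fun p => decide (p.1 = k))
      = F.filter (fun p => decide (p.1 = k)) := by
  rw [PySem.List.sorted_eq_foldl_insertBy, foldl_insertBy_filter F [] k (by simp)]
  rfl

theorem pvLast_sorted (F : List (Int × String)) (k : Int) :
    pvLast (PySem.List.sorted F (fun q => q.1) false) k = pvLast F k := by
  rw [pvLast_eq_filter, pvLast_eq_filter, sorted_filter_key]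

-- the inner while loop, on a sorted tail whose ids are all ≥ i
theorem pvConsume_spec (i : Int) (rest : List (Int × String)) (d : String)
    (hs : rest.Pairwise (fun a b => a.1 ≤ b.1)) (hge : ∀ p ∈ rest, i ≤ p.1) :
    pvConsume i rest d
      = ((pvLast rest i).getD d, rest.filter (fun p => decide (i + 1 ≤ p.1))) := by
  induction rest generalizing d with
  | nil => rfl
  | cons p rest' ih =>
    rw [List.pairwise_cons] at hs
    by_cases hp : p.1 = i
    · have hge' : ∀ q ∈ rest', i ≤ q.1 := fun q hq => hge q (List.mem_cons_of_mem _ hq)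
      simp only [pvConsume, if_pos hp, ih p.2 hs.2 hge', Prod.mk.injEq]
      refine ⟨?_, ?_⟩
      · show (pvLast rest' i).getD p.2 = (pvLast (p :: rest') i).getD d
        simp only [pvLast]
        cases pvLast rest' i with
        | some v => rfl
        | none => simp [hp]
      · rw [List.filter_cons]
        simp [hp]
    · have hgt : i < p.1 := lt_of_le_of_ne (hge p List.mem_cons_self) (Ne.symm hp)
      simp only [pvConsume, if_neg hp]
      have hnone : pvLast (p :: rest') i = none := by
        apply pvLast_eq_none_of
        intro q hq
        rcases List.mem_cons.mp hq with h | h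
        · subst h; omega
        · have := hs.1 q h; omega
      rw [hnone]
      simp only [Prod.mk.injEq, Option.getD_none]
      refine ⟨trivial, ?_⟩
      · symm
        rw [List.filter_eq_self]
        intro q hq
        rcases List.mem_cons.mp hq with h | h
        · subst h; simp; omega
        · have := hs.1 q h; simp; omega

-- the whole merge loop of Source B, as a function of how many slots have been emitted
theorem fold_spec (pairs : List (Int × String))
    (hs : pairs.Pairwise (fun a b => a.1 ≤ b.1)) (h0 : ∀ p ∈ pairs, 0 ≤ p.1) (n : Nat) :
    (PySem.List.pyRange 0 (n : Int) 1).foldl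
      (fun (st : List (Int × String) × List String) i =>
        let r := pvConsume i st.1 ("class_" ++ PySem.Int.toStr i)
        (r.2, st.2 ++ [r.1]))
      (pairs, [])
      = (pairs.filter (fun p => decide ((n : Int) ≤ p.1)),
         (List.range n).map
           (fun (j : Nat) => (pvLast pairs ((j : Nat) : Int)).getD
             ("class_" ++ PySem.Int.toStr ((j : Nat) : Int)))) := by
  induction n with
  | zero =>
    have hr : PySem.List.pyRange 0 ((0 : Nat) : Int) 1 = [] := by
      apply List.eq_nil_of_length_eq_zero
      rw [PySem.List.length_pyRange_one]; rfl
    rw [hr]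
    simp only [List.foldl_nil, List.range_zero, List.map_nil]
    congr 1
    symm
    rw [List.filter_eq_self]
    intro q hq
    have := h0 q hq
    simp; omega
  | succ n ih =>
    have hsplit : PySem.List.pyRange 0 ((n + 1 : Nat) : Int) 1
        = PySem.List.pyRange 0 (n : Int) 1 ++ [(n : Int)] := by
      rw [PySem.List.pyRange_one_append 0 (n : Int) ((n + 1 : Nat) : Int) (by omega) (by omega)]
      congr 1
      rw [PySem.List.pyRange_one_cons (by omega)]
      have : ((n : Int) + 1) = ((n + 1 : Nat) : Int) := by omega
      rw [this]
      have hnil : PySem.List.pyRange ((n + 1 : Nat) : Int) ((n + 1 : Nat) : Int) 1 = [] := by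
        apply List.eq_nil_of_length_eq_zero
        rw [PySem.List.length_pyRange_one]; omega
      rw [hnil]
    rw [hsplit, List.foldl_append, ih, List.foldl_cons, List.foldl_nil]
    have hsf : (pairs.filter (fun p => decide ((n : Int) ≤ p.1))).Pairwise
        (fun a b => a.1 ≤ b.1) := hs.filter _
    have hgef : ∀ p ∈ pairs.filter (fun p => decide ((n : Int) ≤ p.1)), (n : Int) ≤ p.1 := by
      intro p hp
      have := List.of_mem_filter hp
      simpa using this
    rw [pvConsume_spec (n : Int) _ _ hsf hgef]
    simp only [List.filter_filter, Prod.mk.injEq]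
    refine ⟨?_, ?_⟩
    · apply List.filter_congr
      intro q hq; simp; omega
    · rw [List.range_succ, List.map_append, List.map_cons, List.map_nil]
      congr 2
      rw [pvLast_eq_filter, pvLast_eq_filter, List.filter_filter]
      have hfc : List.filter (fun a => decide (a.1 = (n : Int)) && decide ((n : Int) ≤ a.1)) pairs
          = List.filter (fun p => decide (p.1 = (n : Int))) pairs := by
        apply List.filter_congr
        intro q hq
        by_cases h : q.1 = (n : Int)
        · simp [h]
        · simp [h]
      rw [hfc]

-- every member's id is at most the last id of a pairwise-sorted list
theorem le_getLast (l : List (Int × String)) :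
    l.Pairwise (fun a b => a.1 ≤ b.1) → ∀ L : Int × String,
      l.getLast? = some L → ∀ q ∈ l, q.1 ≤ L.1 := by
  induction l with
  | nil => intro _ L hL q hq; cases hq
  | cons y ys ih =>
    intro hp L hL q hq
    rw [List.pairwise_cons] at hp
    cases ys with
    | nil =>
      simp at hL hq
      subst hL; subst hq; rfl
    | cons a t =>
      rw [List.getLast?_cons_cons] at hL
      rcases List.mem_cons.mp hq with h | h
      · subst h
        exact hp.1 L (List.mem_of_getLast? hL)
      · exact ih hp.2 L hL q h

-- A's overwrite loop, elementwise
theorem foldA_length (F : List (Int × String)) (ns : List String) :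
    (F.foldl (fun ns p =>
      if 0 ≤ p.1 ∧ p.1 < (ns.length : Int) then ns.set p.1.toNat p.2 else ns) ns).length
      = ns.length := by
  induction F generalizing ns with
  | nil => rfl
  | cons p F' ih =>
    simp only [List.foldl_cons]
    by_cases hp : (0:Int) ≤ p.1 ∧ p.1 < (ns.length : Int)
    · simp [hp, ih]
    · simp [hp, ih]

theorem foldA_getElem? (F : List (Int × String)) (ns : List String) (j : Nat)
    (hj : j < ns.length) :
    (F.foldl (fun ns p =>
      if 0 ≤ p.1 ∧ p.1 < (ns.length : Int) then ns.set p.1.toNat p.2 else ns) ns)[j]?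
      = match pvLast F (j : Int) with
        | some v => some v
        | none => ns[j]? := by
  induction F generalizing ns with
  | nil => rfl
  | cons p F' ih =>
    simp only [List.foldl_cons, pvLast]
    by_cases hp : (0:Int) ≤ p.1 ∧ p.1 < (ns.length : Int)
    · rw [if_pos hp, ih _ (by simpa using hj)]
      cases pvLast F' (j : Int) with
      | some v => rfl
      | none =>
        by_cases hk : p.1 = (j : Int)
        · have hnat : p.1.toNat = j := by omega
          simp [hk, hj]
        · have hnat : p.1.toNat ≠ j := by omega
          simp [hk, hnat]
    · rw [if_neg hp, ih _ hj]
      cases pvLast F' (j : Int) with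
      | some v => rfl
      | none =>
        by_cases hk : p.1 = (j : Int)
        · exfalso; apply hp; constructor <;> omega
        · simp [hk]

-- ===== VERDICT (by name: the statement is the Claim_ definition above) =====
theorem names_from_label_id_map_py_spec : Claim_equal_names_from_label_id_map_py := by
  intro l _
  unfold Spec_names_from_label_id_map_py
  simp only [names_from_label_id_map_py, names_from_label_id_map_py_alt]
  set F := l.filterMap (fun p => if 0 ≤ p.2 then some (p.2, p.1) else none) with hF
  have h0 : ∀ p ∈ F, (0:Int) ≤ p.1 := by
    intro p hp
    rcases List.mem_filterMap.mp hp with ⟨q, _, hq⟩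
    by_cases h2 : (0:Int) ≤ q.2
    · rw [if_pos h2] at hq; cases hq; omega
    · rw [if_neg h2] at hq; cases hq
  set pairs := PySem.List.sorted F (fun q => q.1) false with hpairs
  have hperm : ∀ x, x ∈ pairs ↔ x ∈ F := fun x => PySem.List.mem_sorted F _ false x
  have hs : pairs.Pairwise (fun a b => a.1 ≤ b.1) := by
    have := PySem.List.sorted_pairwise F (fun q => q.1)
    simpa using this
  have h0p : ∀ p ∈ pairs, (0:Int) ≤ p.1 := fun p hp => h0 p ((hperm p).mp hp)
  rcases eq_or_ne F [] with hFe | hFn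
  · have : pairs = [] := (PySem.List.sorted_eq_nil_iff F _ false).mpr hFe
    rw [if_pos hFe, this]
    rfl
  · have hpne : pairs ≠ [] := fun h => hFn ((PySem.List.sorted_eq_nil_iff F _ false).mp h)
    rw [if_neg hFn]
    cases hL : pairs.getLast? with
    | none => exact absurd (List.getLast?_eq_none_iff.mp hL) hpne
    | some L =>
      cases eM : PySem.List.max? (F.map Prod.fst) (fun x => x) with
      | none =>
        have : F.map Prod.fst = [] := (PySem.List.max?_eq_none_iff _ _).mp eM
        exact absurd (by simpa using this) hFn
      | some M =>
        -- M = L.1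
        have hLm : L ∈ pairs := List.mem_of_getLast? hL
        have hML : M = L.1 := by
          have h1 : M ≤ L.1 := by
            rcases List.mem_map.mp (PySem.List.max?_mem eM) with ⟨q, hq, hq2⟩
            have : q ∈ pairs := (hperm q).mpr hq
            have := le_getLast pairs hs L hL q this
            omega
          have h2 : L.1 ≤ M := by
            have : L.1 ∈ F.map Prod.fst :=
              List.mem_map.mpr ⟨L, (hperm L).mp hLm, rfl⟩
            exact PySem.List.max?_isMax eM L.1 this
          omega
        have hL0 : (0:Int) ≤ L.1 := h0p L hLm
        have hn : ((L.1 + 1).toNat : Int) = L.1 + 1 := by omega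
        have hM1 : M + 1 = (((L.1 + 1).toNat : Nat) : Int) := by omega
        show _ = ((PySem.List.pyRange 0 (L.1 + 1) 1).foldl
          (fun (st : List (Int × String) × List String) i =>
            ((pvConsume i st.1 ("class_" ++ PySem.Int.toStr i)).2,
              st.2 ++ [(pvConsume i st.1 ("class_" ++ PySem.Int.toStr i)).1]))
          (pairs, [])).2
        rw [← hn, fold_spec pairs hs h0p ((L.1 + 1).toNat)]
        set n := (L.1 + 1).toNat with hnn
        -- elementwise comparison
        have hsnd : ∀ (x : List (Int × String)) (y : List String), (Prod.mk x y).2 = y :=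
          fun _ _ => rfl
        rw [hsnd]
        apply List.ext_getElem?
        intro j
        by_cases hjlt : j < n
        · rw [foldA_getElem? _ _ j (by rw [List.length_map, PySem.List.length_pyRange_one]; omega)]
          have hAj : ((PySem.List.pyRange 0 (M + 1) 1).map
              (fun i => "class_" ++ PySem.Int.toStr i))[j]?
              = some ("class_" ++ PySem.Int.toStr (j : Int)) := by
            rw [List.getElem?_map, PySem.List.getElem?_pyRange_one, if_pos (by omega)]
            simp
          have hBj : ((List.range n).map
              (fun (k : Nat) => (pvLast pairs ((k : Nat) : Int)).getD
                ("class_" ++ PySem.Int.toStr ((k : Nat) : Int))))[j]?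
              = some ((pvLast pairs (j : Int)).getD ("class_" ++ PySem.Int.toStr (j : Int))) := by
            rw [List.getElem?_map, List.getElem?_range hjlt]
            rfl
          rw [hAj, hBj, hpairs, pvLast_sorted]
          cases pvLast F (j : Int) <;> rfl
        · rw [List.getElem?_eq_none (by rw [foldA_length, List.length_map, PySem.List.length_pyRange_one]; omega),
            List.getElem?_eq_none (by rw [List.length_map, List.length_range]; omega)]
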